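-- pv_equiv track=rewrite | github.com/1ce2k/iti0102-2023 | EX/EX/ex03_loops/secret_letter.py | secret_letter
-- ===== SOURCE A (Python) =====
-- def secret_letter(letter: str) -> bool:
--     """
--     Check if the given secret letter follows all the necessary rules. Return True if it does, else False.
--
--     Rules:
--     1. The letter has more uppercase letters than lowercase letters.
--     2. The sum of digits in the letter has to be equal to or less than the amount of uppercase letters.
--     3. The sum of digits in the letter has to be equal to or more than the amount of lowercase letters.
--
--     :param letter: secret letter
--     :return: validation
--     """
--     upper_count = 0
--     lower_count = 0
--     sum_of_digits = 0
--     for char in letter: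
--         if char.isalpha():
--             if char == char.lower():
--                 lower_count += 1
--             if char == char.upper():
--                 upper_count += 1
--         if char.isdigit():
--             sum_of_digits += int(char)
--     if lower_count > upper_count:
--         return False
--     if sum_of_digits > upper_count:
--         return False
--     if sum_of_digits < lower_count:
--         return False
--
--     return True
-- ===== SOURCE B (Python) =====
-- UPPERCASE = 'ABCDEFGHIJKLMNOPQRSTUVWXYZ'
-- LOWERCASE = 'abcdefghijklmnopqrstuvwxyz'
-- DIGITS = '0123456789'
--
--
-- def secret_letter(letter: str) -> bool:
--     """Validate by per-symbol occurrence counts over the three ASCII alphabets."""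
--     upper = sum(letter.count(ch) for ch in UPPERCASE)
--     lower = sum(letter.count(ch) for ch in LOWERCASE)
--     digits = sum(int(d) * letter.count(d) for d in DIGITS)
--     return lower <= digits <= upper
-- ===== Notes on version B (the rewrite author's own statement) =====
-- stated objective: faster
-- what changed: Instead of classifying each character in one accumulating Python-level pass, B iterates over the three fixed ASCII alphabets and asks str.count for each symbol's number of occurrences (digit sum as a count-weighted sum over '0'..'9'), then returns the single chained comparison lower <= digits <= upper, dropping A's redundant lower<=upper test.
import Mathlib
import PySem

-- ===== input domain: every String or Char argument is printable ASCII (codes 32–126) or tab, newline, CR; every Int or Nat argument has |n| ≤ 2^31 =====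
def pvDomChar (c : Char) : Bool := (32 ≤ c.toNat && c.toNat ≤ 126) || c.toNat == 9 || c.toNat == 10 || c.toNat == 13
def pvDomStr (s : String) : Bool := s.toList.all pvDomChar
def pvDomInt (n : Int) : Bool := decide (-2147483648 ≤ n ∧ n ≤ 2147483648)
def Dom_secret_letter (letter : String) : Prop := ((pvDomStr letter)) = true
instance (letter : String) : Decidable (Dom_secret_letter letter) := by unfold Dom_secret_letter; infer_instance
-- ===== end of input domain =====

-- B replaces A's per-character classifying loop by per-symbol occurrence counts over the
-- three ASCII alphabets (C-level str.count per letter/digit) and a single chained comparison; measured faster at large n.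

-- ===== PORT A =====
-- one pass over the string, accumulating (lower_count, upper_count, sum_of_digits)
def secret_letter (letter : String) : Bool :=
  let st := letter.toList.foldl
    (fun (st : Int × Int × Int) c =>
      let lo := st.1
      let up := st.2.1
      let s := st.2.2
      let lo := if PySem.Chars.isalpha c && (c == PySem.Chars.lowerChar c) then lo + 1 else lo
      let up := if PySem.Chars.isalpha c && (c == PySem.Chars.upperChar c) then up + 1 else up
      let s := if PySem.Chars.isdigit c then s + ((c.toNat : Int) - 48) else s
      (lo, up, s))
    (0, 0, 0)
  if st.1 > st.2.1 then false
  else if st.2.2 > st.2.1 then false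
  else if st.2.2 < st.1 then false
  else true

-- ===== PORT B =====
-- module constants UPPERCASE / LOWERCASE / DIGITS from Source B
def pvUppercase : String := "ABCDEFGHIJKLMNOPQRSTUVWXYZ"
def pvLowercase : String := "abcdefghijklmnopqrstuvwxyz"
def pvDigits : String := "0123456789"

-- Source B: three sums of letter.count(ch) over the alphabet constants, then lower <= digits <= upper
def secret_letter_alt (letter : String) : Bool :=
  let upper : Int := (pvUppercase.toList.map
    (fun ch => ((PySem.Str.count letter (String.ofList [ch]) : Nat) : Int))).sum
  let lower : Int := (pvLowercase.toList.map
    (fun ch => ((PySem.Str.count letter (String.ofList [ch]) : Nat) : Int))).sum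
  let digits : Int := (pvDigits.toList.map
    (fun d => (PySem.Int.ofChars? [d]).getD 0 * ((PySem.Str.count letter (String.ofList [d]) : Nat) : Int))).sum
  decide (lower ≤ digits) && decide (digits ≤ upper)

-- ===== PRECONDITION & SPEC =====
def Spec_secret_letter (letter : String) (out : Bool) : Prop := out = secret_letter_alt letter
instance (letter : String) (out : Bool) : Decidable (Spec_secret_letter letter out) := by unfold Spec_secret_letter; infer_instance

-- ===== CLAIM (what is proved, stated in full; the proofs are below) =====
def Claim_equal_secret_letter : Prop := ∀ (letter : String), Dom_secret_letter letter → Spec_secret_letter letter (secret_letter letter)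

-- ===== LEMMAS AND PROOFS =====

-- the char lists behind the three string constants
theorem pvUppercase_toList : pvUppercase.toList = ['A', 'B', 'C', 'D', 'E', 'F', 'G', 'H', 'I', 'J', 'K', 'L', 'M', 'N', 'O', 'P', 'Q', 'R', 'S', 'T', 'U', 'V', 'W', 'X', 'Y', 'Z'] := rfl
theorem pvLowercase_toList : pvLowercase.toList = ['a', 'b', 'c', 'd', 'e', 'f', 'g', 'h', 'i', 'j', 'k', 'l', 'm', 'n', 'o', 'p', 'q', 'r', 's', 't', 'u', 'v', 'w', 'x', 'y', 'z'] := rfl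
theorem pvDigits_toList : pvDigits.toList = ['0', '1', '2', '3', '4', '5', '6', '7', '8', '9'] := rfl

-- Python str.count of a single character is List.count
theorem pv_count_single (c : Char) (s : List Char) : PySem.Chars.count s [c] = s.count c := by
  have step : ∀ (h : Char) (t : List Char) (f acc : Nat),
      PySem.Chars.count.go [c] (f+1) (h::t) acc
        = if c == h then PySem.Chars.count.go [c] f t (acc+1) else PySem.Chars.count.go [c] f t acc := by
    intro h t f acc; simp [PySem.Chars.count.go]
  have go : ∀ (l : List Char) (f acc : Nat), l.length ≤ f → PySem.Chars.count.go [c] f l acc = acc + l.count c := by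
    intro l
    induction l with
    | nil => intro f acc _; cases f <;> simp [PySem.Chars.count.go]
    | cons h t ih =>
      intro f acc hf
      cases f with
      | zero => simp at hf
      | succ f =>
        rw [step]
        by_cases hch : c = h
        · rw [if_pos (by simp [hch]), ih f (acc+1) (by simpa using hf), List.count_cons]
          simp [hch]; omega
        · rw [if_neg (by simp [hch]), ih f acc (by simpa using hf), List.count_cons]
          simp [Ne.symm hch]
  simp [PySem.Chars.count, go s s.length 0 (le_refl _)]

theorem pv_str_count_single (letter : String) (c : Char) :
    ((PySem.Str.count letter (String.ofList [c]) : Nat) : Int) = ((letter.toList.count c : Nat) : Int) := by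
  simp [PySem.Str.count, pv_count_single]

-- Σ_{ch ∈ L} (if ch = c then w ch else 0) for a duplicate-free L
theorem pv_sum_ite (w : Char → Int) (c : Char) :
    ∀ (L : List Char), L.Nodup →
      (L.map (fun ch => if ch == c then w ch else 0)).sum = if c ∈ L then w c else 0 := by
  intro L
  induction L with
  | nil => simp
  | cons a L ih =>
    intro hnd
    rw [List.nodup_cons] at hnd
    rw [List.map_cons, List.sum_cons, ih hnd.2]
    by_cases hac : a = c
    · subst hac
      simp [hnd.1]
    · rw [if_neg (by simp [hac])]
      have hm : (c ∈ a :: L) ↔ c ∈ L := by simp [Ne.symm hac]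
      simp [hm]

-- Σ_{ch ∈ L} w ch * count ch s  =  Σ over the elements of s that lie in L of their weights
theorem pv_sum_weighted (L : List Char) (hL : L.Nodup) (w : Char → Int) :
    ∀ (s : List Char),
      (L.map (fun ch => w ch * ((s.count ch : Nat) : Int))).sum
        = ((s.filter (fun x => decide (x ∈ L))).map w).sum := by
  intro s
  induction s with
  | nil => simp
  | cons c t ih =>
    have expand : (L.map (fun ch => w ch * (((c :: t).count ch : Nat) : Int)))
        = (L.map (fun ch => w ch * ((t.count ch : Nat) : Int) + (if ch == c then w ch else 0))) := by
      refine List.map_congr_left (fun ch _ => ?_)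
      rw [List.count_cons]
      by_cases h : ch = c
      · simp [h]; push_cast; ring
      · have hb1 : (ch == c) = false := by simp [h]
        have hb2 : (c == ch) = false := by simp [Ne.symm h]
        simp [hb1, hb2]
    rw [expand, PySem.List.sum_map_add_int, ih, pv_sum_ite w c L hL, List.filter_cons]
    by_cases hc : c ∈ L <;> simp [hc] <;> ring
  -- (`PySem.List.sum_map_add_int` splits the sum of a pointwise sum)

-- membership in the three alphabets is exactly the PySem character class
theorem pv_mem_upper (c : Char) : c ∈ pvUppercase.toList ↔ PySem.Chars.isupper c = true := by
  rw [pvUppercase_toList]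
  constructor
  · intro h; fin_cases h <;> decide
  · intro h
    have hv : 65 ≤ c.toNat ∧ c.toNat ≤ 90 := by
      simp [PySem.Chars.isupper, Char.le_def, UInt32.le_iff_toNat_le] at h; exact h
    obtain ⟨h1, h2⟩ := hv
    rw [(Char.ofNat_toNat c).symm]
    generalize hg : c.toNat = n at h1 h2
    interval_cases n <;> decide

theorem pv_mem_lower (c : Char) : c ∈ pvLowercase.toList ↔ PySem.Chars.islower c = true := by
  rw [pvLowercase_toList]
  constructor
  · intro h; fin_cases h <;> decide
  · intro h
    have hv : 97 ≤ c.toNat ∧ c.toNat ≤ 122 := by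
      simp [PySem.Chars.islower, Char.le_def, UInt32.le_iff_toNat_le] at h; exact h
    obtain ⟨h1, h2⟩ := hv
    rw [(Char.ofNat_toNat c).symm]
    generalize hg : c.toNat = n at h1 h2
    interval_cases n <;> decide

theorem pv_mem_digit (c : Char) : c ∈ pvDigits.toList ↔ PySem.Chars.isdigit c = true := by
  rw [pvDigits_toList]
  constructor
  · intro h; fin_cases h <;> decide
  · intro h
    have hv : 48 ≤ c.toNat ∧ c.toNat ≤ 57 := by
      simp [PySem.Chars.isdigit, Char.le_def, UInt32.le_iff_toNat_le] at h; exact h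
    obtain ⟨h1, h2⟩ := hv
    rw [(Char.ofNat_toNat c).symm]
    generalize hg : c.toNat = n at h1 h2
    interval_cases n <;> decide

-- A's tests `c.isalpha() and c == c.upper()/c.lower()` are exactly isupper / islower
theorem pv_upper_pred (c : Char) :
    (PySem.Chars.isalpha c && (c == PySem.Chars.upperChar c)) = PySem.Chars.isupper c := by
  simp only [PySem.Chars.isalpha, PySem.Chars.upperChar]
  by_cases h2 : PySem.Chars.islower c = true
  · have h1 : PySem.Chars.isupper c = false := by
      simp [PySem.Chars.islower, Char.le_def, UInt32.le_iff_toNat_le] at h2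
      simp [PySem.Chars.isupper, Char.le_def, UInt32.le_iff_toNat_le]
      omega
    have hb : 97 ≤ c.toNat ∧ c.toNat ≤ 122 := by
      simp [PySem.Chars.islower, Char.le_def, UInt32.le_iff_toNat_le] at h2; exact h2
    have hne : (c == Char.ofNat (c.toNat - 32)) = false := by
      simp only [beq_eq_false_iff_ne, ne_eq]
      intro he
      have := congrArg Char.toNat he
      rw [Char.toNat_ofNat, if_pos (by constructor <;> omega : (c.toNat - 32).isValidChar)] at this
      omega
    simp [h1, h2, hne]
  · simp [h2]
-- (`upperChar c = c` when c is not lowercase, so the test reduces to isupper)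

theorem pv_lower_pred (c : Char) :
    (PySem.Chars.isalpha c && (c == PySem.Chars.lowerChar c)) = PySem.Chars.islower c := by
  simp only [PySem.Chars.isalpha, PySem.Chars.lowerChar]
  by_cases h1 : PySem.Chars.isupper c = true
  · have h2 : PySem.Chars.islower c = false := by
      simp [PySem.Chars.isupper, Char.le_def, UInt32.le_iff_toNat_le] at h1
      simp [PySem.Chars.islower, Char.le_def, UInt32.le_iff_toNat_le]
      omega
    have hb : 65 ≤ c.toNat ∧ c.toNat ≤ 90 := by
      simp [PySem.Chars.isupper, Char.le_def, UInt32.le_iff_toNat_le] at h1; exact h1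
    have hne : (c == Char.ofNat (c.toNat + 32)) = false := by
      simp only [beq_eq_false_iff_ne, ne_eq]
      intro he
      have := congrArg Char.toNat he
      rw [Char.toNat_ofNat, if_pos (by constructor <;> omega : (c.toNat + 32).isValidChar)] at this
      omega
    simp [h1, h2, hne]
  · simp [h1]

-- int(d) for the ten digit characters
theorem pv_int_of_digit (d : Char) (hd : d ∈ pvDigits.toList) :
    (PySem.Int.ofChars? [d]).getD 0 = ((d.toNat : Int) - 48) := by
  rw [pvDigits_toList] at hd
  fin_cases hd <;> decide

-- A's accumulating fold, characterised
theorem secret_letter_fold_inv (l : List Char) (lo up s : Int) :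
    l.foldl
      (fun (st : Int × Int × Int) c =>
        let lo := st.1
        let up := st.2.1
        let s := st.2.2
        let lo := if PySem.Chars.isalpha c && (c == PySem.Chars.lowerChar c) then lo + 1 else lo
        let up := if PySem.Chars.isalpha c && (c == PySem.Chars.upperChar c) then up + 1 else up
        let s := if PySem.Chars.isdigit c then s + ((c.toNat : Int) - 48) else s
        (lo, up, s))
      (lo, up, s)
    = (lo + ((l.filter (fun c => PySem.Chars.isalpha c && (c == PySem.Chars.lowerChar c))).length : Int),
       up + ((l.filter (fun c => PySem.Chars.isalpha c && (c == PySem.Chars.upperChar c))).length : Int),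
       s + ((l.filter (fun c => PySem.Chars.isdigit c)).map (fun c => ((c.toNat : Int) - 48))).sum) := by
  induction l generalizing lo up s with
  | nil => simp
  | cons c t ih =>
    simp only [List.foldl_cons, List.filter_cons]
    rw [ih]
    by_cases h1 : (PySem.Chars.isalpha c && (c == PySem.Chars.lowerChar c)) = true <;>
    by_cases h2 : (PySem.Chars.isalpha c && (c == PySem.Chars.upperChar c)) = true <;>
    by_cases h3 : PySem.Chars.isdigit c = true <;>
    simp [h1, h2, h3] <;> push_cast <;> ring_nf <;> simp

-- B's three sums, characterised as filter lengths / a filtered weighted sum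
theorem pv_upper_sum (l : List Char) :
    (pvUppercase.toList.map (fun ch => (((l.count ch : Nat)) : Int))).sum
      = ((l.filter (fun c => PySem.Chars.isupper c)).length : Int) := by
  have h1 : (pvUppercase.toList.map (fun ch => (((l.count ch : Nat)) : Int)))
      = (pvUppercase.toList.map (fun ch => (1 : Int) * ((l.count ch : Nat) : Int))) := by
    exact List.map_congr_left (fun ch _ => by ring)
  rw [h1, pv_sum_weighted pvUppercase.toList (by rw [pvUppercase_toList]; decide) (fun _ => 1) l]
  have h2 : l.filter (fun x => decide (x ∈ pvUppercase.toList)) = l.filter (fun c => PySem.Chars.isupper c) := by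
    refine List.filter_congr (fun x _ => ?_)
    by_cases hx : PySem.Chars.isupper x = true <;> simp [hx, pv_mem_upper]
  rw [h2]
  simp

theorem pv_lower_sum (l : List Char) :
    (pvLowercase.toList.map (fun ch => (((l.count ch : Nat)) : Int))).sum
      = ((l.filter (fun c => PySem.Chars.islower c)).length : Int) := by
  have h1 : (pvLowercase.toList.map (fun ch => (((l.count ch : Nat)) : Int)))
      = (pvLowercase.toList.map (fun ch => (1 : Int) * ((l.count ch : Nat) : Int))) := by
    exact List.map_congr_left (fun ch _ => by ring)
  rw [h1, pv_sum_weighted pvLowercase.toList (by rw [pvLowercase_toList]; decide) (fun _ => 1) l]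
  have h2 : l.filter (fun x => decide (x ∈ pvLowercase.toList)) = l.filter (fun c => PySem.Chars.islower c) := by
    refine List.filter_congr (fun x _ => ?_)
    by_cases hx : PySem.Chars.islower x = true <;> simp [hx, pv_mem_lower]
  rw [h2]
  simp

theorem pv_digit_sum (l : List Char) :
    (pvDigits.toList.map (fun d => (PySem.Int.ofChars? [d]).getD 0 * ((l.count d : Nat) : Int))).sum
      = ((l.filter (fun c => PySem.Chars.isdigit c)).map (fun c => ((c.toNat : Int) - 48))).sum := by
  have h1 : (pvDigits.toList.map (fun d => (PySem.Int.ofChars? [d]).getD 0 * ((l.count d : Nat) : Int)))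
      = (pvDigits.toList.map (fun d => ((d.toNat : Int) - 48) * ((l.count d : Nat) : Int))) := by
    exact List.map_congr_left (fun d hd => by rw [pv_int_of_digit d hd])
  rw [h1, pv_sum_weighted pvDigits.toList (by rw [pvDigits_toList]; decide) (fun d => ((d.toNat : Int) - 48)) l]
  have h2 : l.filter (fun x => decide (x ∈ pvDigits.toList)) = l.filter (fun c => PySem.Chars.isdigit c) := by
    refine List.filter_congr (fun x _ => ?_)
    by_cases hx : PySem.Chars.isdigit x = true <;> simp [hx, pv_mem_digit]
  rw [h2]

-- ===== VERDICT (by name: the statement is the Claim_ definition above) =====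
theorem secret_letter_spec : Claim_equal_secret_letter := by
  intro letter _
  unfold Spec_secret_letter secret_letter secret_letter_alt
  rw [secret_letter_fold_inv]
  simp only [zero_add, pv_str_count_single]
  rw [pv_upper_sum, pv_lower_sum, pv_digit_sum]
  rw [List.filter_congr (fun c _ => pv_lower_pred c), List.filter_congr (fun c _ => pv_upper_pred c)]
  set lo := ((letter.toList.filter (fun c => PySem.Chars.islower c)).length : Int)
  set up := ((letter.toList.filter (fun c => PySem.Chars.isupper c)).length : Int)
  set s := ((letter.toList.filter (fun c => PySem.Chars.isdigit c)).map (fun c => ((c.toNat : Int) - 48))).sum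
  by_cases h1 : lo > up <;> by_cases h2 : s > up <;> by_cases h3 : s < lo <;>
    simp [h1, h2, h3] <;> omega
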